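-- pv_equiv track=rewrite | github.com/Stray777/Information-Security-Engineering-Training-2-DualMachine-Decryption | model.py | std_plain_txt
-- ===== SOURCE A (Python) =====
-- def std_plain_txt(text: str) -> str:       # 规范明文，在有连续相同字符的地方插入 q
--     std_plain_txt = ''
--     repeat_monitor = ''  # 一会循环时候检查有没有两个挨着的重复的检控器变量
--     new_str = text.replace(' ', '')  # 除去文本中的空格
--     new_str = new_str.replace('\n', '')  # 去除换行符，无奈至举，后续可以把for循环改成while循环给加回来
--     new_str = new_str.lower()  # 将大写改成小写
--     for item in new_str:
--         if item == repeat_monitor: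
--             std_plain_txt += 'q'
--             std_plain_txt += item
--             repeat_monitor = item
--         else:
--             std_plain_txt += item
--             repeat_monitor = item
--     txt_len = len(std_plain_txt)
--     if txt_len % 2 == 0:
--         return std_plain_txt
--     if txt_len % 2 == 1:
--         std_plain_txt += 'q'
--         return std_plain_txt
--     else:
--         return "error in fun std_plain_txt()"
-- ===== SOURCE B (Python) =====
-- def std_plain_txt(text: str) -> str:
--     # Run-grouping decomposition: split the cleaned text into maximal runs of
--     # equal characters, join each run with 'q', then pad to even length.
--     s = text.replace(' ', '').replace('\n', '').lower()
--     pieces = []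
--     i = 0
--     n = len(s)
--     while i < n:
--         j = i
--         while j < n and s[j] == s[i]:
--             j += 1
--         pieces.append('q'.join(s[i:j]))
--         i = j
--     out = ''.join(pieces)
--     return out + 'q' if len(out) % 2 == 1 else out
-- ===== Notes on version B (the rewrite author's own statement) =====
-- stated objective: alternative
-- what changed: Replaces the stateful previous-character loop by a run-grouping decomposition: the cleaned text is split into maximal runs of equal characters, the separator letter q is inserted within each run, and the pieces are concatenated and padded to even length.
import Mathlib
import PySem

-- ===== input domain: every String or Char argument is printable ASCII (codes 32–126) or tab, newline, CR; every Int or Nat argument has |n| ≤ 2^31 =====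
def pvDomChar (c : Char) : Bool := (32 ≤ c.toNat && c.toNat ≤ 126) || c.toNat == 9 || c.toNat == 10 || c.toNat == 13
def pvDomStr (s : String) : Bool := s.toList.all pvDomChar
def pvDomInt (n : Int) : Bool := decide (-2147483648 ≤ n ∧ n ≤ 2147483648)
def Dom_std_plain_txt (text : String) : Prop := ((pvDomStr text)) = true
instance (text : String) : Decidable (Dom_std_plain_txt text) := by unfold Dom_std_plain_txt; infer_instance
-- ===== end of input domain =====

-- B rewrites A's stateful previous-character loop as a run-grouping decomposition (same values, similar cost).

-- ===== PORT A =====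
-- loop body: repeat_monitor is the one-char string of the previous character ([] = initial '')
def pvStepA (st : List Char × List Char) (item : Char) : List Char × List Char :=
  if [item] == st.2 then (st.1 ++ ['q', item], [item]) else (st.1 ++ [item], [item])

def std_plain_txt (text : String) : String :=
  let new1 := PySem.Str.replace text " " ""
  let new2 := PySem.Str.replace new1 "\n" ""
  let ns := PySem.Str.lower new2
  let res := (ns.toList.foldl pvStepA ([], [])).1
  let txtLen := res.length
  if txtLen % 2 = 0 then String.ofList res
  else if txtLen % 2 = 1 then String.ofList (res ++ ['q'])
  else "error in fun std_plain_txt()"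

-- ===== PORT B =====
-- maximal runs of equal characters, each joined with 'q' ('q'.join on a run = intersperse)
def pvRunsQ : List Char → List Char
  | [] => []
  | c :: cs =>
    List.intersperse 'q' (c :: cs.takeWhile (· == c)) ++ pvRunsQ (cs.dropWhile (· == c))
termination_by l => l.length
decreasing_by
  have := List.length_dropWhile_le (· == c) cs
  simp; omega

def std_plain_txt_alt (text : String) : String :=
  let s := PySem.Str.lower (PySem.Str.replace (PySem.Str.replace text " " "") "\n" "")
  let out := pvRunsQ s.toList
  if out.length % 2 = 1 then String.ofList (out ++ ['q']) else String.ofList out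

-- ===== PRECONDITION & SPEC =====
def Spec_std_plain_txt (text : String) (out : String) : Prop := out = std_plain_txt_alt text
instance (text : String) (out : String) : Decidable (Spec_std_plain_txt text out) := by unfold Spec_std_plain_txt; infer_instance

-- ===== CLAIM (what is proved, stated in full; the proofs are below) =====
def Claim_equal_std_plain_txt : Prop := ∀ (text : String), Dom_std_plain_txt text → Spec_std_plain_txt text (std_plain_txt text)

-- ===== LEMMAS AND PROOFS =====

-- A's loop from an arbitrary accumulator: the accumulator factors out
lemma foldA_acc (cs : List Char) (acc mon : List Char) :
    (cs.foldl pvStepA (acc, mon)).1 = acc ++ (cs.foldl pvStepA ([], mon)).1 := by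
  induction cs generalizing acc mon with
  | nil => simp
  | cons c cs ih =>
    simp only [List.foldl_cons, pvStepA]
    by_cases h : [c] == mon
    · simp [h, ih (acc ++ ['q', c]), ih ['q', c]]
    · simp [h, ih (acc ++ [c]), ih [c]]

-- A's loop as a structural recursion
lemma coreA_cons (c : Char) (cs : List Char) (mon : List Char) :
    ((c :: cs).foldl pvStepA ([], mon)).1
      = (if [c] == mon then ['q', c] else [c]) ++ (cs.foldl pvStepA ([], [c])).1 := by
  simp only [List.foldl_cons, pvStepA]
  by_cases h : [c] == mon
  · simp [h, foldA_acc cs ['q', c]]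
  · simp [h, foldA_acc cs [c]]

lemma intersperse_eq_flatMap (sep a : Char) (l : List Char) :
    List.intersperse sep (a :: l) = a :: l.flatMap (fun x => [sep, x]) := by
  induction l generalizing a with
  | nil => simp
  | cons b t ih => simp [List.intersperse, ih b]

-- within a run of c (with previous character c), each char contributes 'q' + char
lemma coreA_run (cs : List Char) (c : Char) :
    (cs.foldl pvStepA ([], [c])).1
      = (cs.takeWhile (· == c)).flatMap (fun x => ['q', x])
        ++ ((cs.dropWhile (· == c)).foldl pvStepA ([], [c])).1 := by
  induction cs generalizing c with
  | nil => simp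
  | cons d ds ih =>
    by_cases h : d = c
    · subst h
      rw [coreA_cons]
      simp only [List.takeWhile_cons, List.dropWhile_cons, beq_self_eq_true, if_true]
      simp [ih d]
    · have hb : (d == c) = false := by simp [h]
      simp [hb]

lemma coreA_eq_runsQ : ∀ (n : ℕ) (cs : List Char), cs.length ≤ n →
    ∀ mon : List Char, (∀ c, cs.head? = some c → mon ≠ [c]) →
    (cs.foldl pvStepA ([], mon)).1 = pvRunsQ cs := by
  intro n
  induction n with
  | zero =>
    intro cs h mon _
    have : cs = [] := List.eq_nil_of_length_eq_zero (Nat.le_zero.mp h)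
    subst this; simp [pvRunsQ]
  | succ n ih =>
    intro cs h mon hmon
    match cs with
    | [] => simp [pvRunsQ]
    | c :: cs' =>
      have hne : ¬ ([c] == mon) = true := by
        intro hb
        exact hmon c rfl (by simpa [eq_comm] using (beq_iff_eq.mp hb).symm)
      rw [coreA_cons, if_neg hne, coreA_run]
      rw [pvRunsQ, intersperse_eq_flatMap]
      have hd : ((cs'.dropWhile (· == c)).foldl pvStepA ([], [c])).1
          = pvRunsQ (cs'.dropWhile (· == c)) := by
        apply ih
        · have := List.length_dropWhile_le (· == c) cs'
          simp at h; omega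
        · intro d hdhead heq
          have hmem : d ∈ (cs'.dropWhile (· == c)).head?.toList := by simp [hdhead]
          have hdc : ¬ (d == c) = true := by
            have := List.head?_dropWhile_not (p := (· == c)) (l := cs')
            cases hh : (cs'.dropWhile (· == c)).head? with
            | none => simp [hh] at hdhead
            | some e =>
              rw [hh] at hdhead; cases hdhead
              simpa [hh] using this
          apply hdc
          have : c = d := by
            have := congrArg (fun l => l.head?) heq
            simpa using this
          simp [this]
      rw [hd]
      simp

-- ===== VERDICT (by name: the statement is the Claim_ definition above) =====
theorem std_plain_txt_spec : Claim_equal_std_plain_txt := by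
  intro text _
  unfold Spec_std_plain_txt std_plain_txt std_plain_txt_alt
  simp only []
  set s := PySem.Str.lower (PySem.Str.replace (PySem.Str.replace text " " "") "\n" "") with hs
  have hcore : (s.toList.foldl pvStepA ([], [])).1 = pvRunsQ s.toList := by
    apply coreA_eq_runsQ s.toList.length s.toList le_rfl
    intro c _ h
    simp at h
  rw [hcore]
  rcases Nat.mod_two_eq_zero_or_one (pvRunsQ s.toList).length with hpar | hpar <;>
    simp [hpar]
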